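-- pv_equiv track=rewrite | github.com/DEC4F/Leetcode-Sol | 1442. Count Triplets That Can Form Two Arrays of Equal XOR/CountTriplets.py | countTriplets_BF_TLE
-- ===== SOURCE A (Python) =====
-- from typing import List
--
-- def countTriplets_BF_TLE(arr: List[int]) -> int:
--     """
--     T(n) = O(n^4)
--     S(n) = O(1)
--     """
--     from functools import reduce
--     res = 0
--     for i in range(len(arr) - 1):
--         for j in range(i + 1, len(arr)):
--             for k in range(j, len(arr)):
--                 a = reduce((lambda x, y : x ^ y), arr[i : j])
--                 b = reduce((lambda x, y : x ^ y), arr[j : k + 1])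
--                 if a == b:
--                     res += 1
--     return res
-- ===== SOURCE B (Python) =====
-- def countTriplets_BF_TLE(arr):
--     # valid triplet (i, j, k) iff xor(arr[i..k]) == 0; each such (i, k) contributes k - i choices of j
--     res = 0
--     n = len(arr)
--     for i in range(n):
--         cur = 0
--         for k in range(i, n):
--             cur ^= arr[k]
--             if cur == 0:
--                 res += k - i
--     return res
-- ===== Notes on version B (the rewrite author's own statement) =====
-- stated objective: faster
-- what changed: B replaces A's quadruple work (three nested index loops each re-XOR-ing two slices via reduce) by the identity that (i,j,k) is valid iff XOR of arr[i..k] is 0, so each such (i,k) contributes k-i triplets: one running-XOR inner loop per start index, O(n^2) total with no slicing.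
import Mathlib
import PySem

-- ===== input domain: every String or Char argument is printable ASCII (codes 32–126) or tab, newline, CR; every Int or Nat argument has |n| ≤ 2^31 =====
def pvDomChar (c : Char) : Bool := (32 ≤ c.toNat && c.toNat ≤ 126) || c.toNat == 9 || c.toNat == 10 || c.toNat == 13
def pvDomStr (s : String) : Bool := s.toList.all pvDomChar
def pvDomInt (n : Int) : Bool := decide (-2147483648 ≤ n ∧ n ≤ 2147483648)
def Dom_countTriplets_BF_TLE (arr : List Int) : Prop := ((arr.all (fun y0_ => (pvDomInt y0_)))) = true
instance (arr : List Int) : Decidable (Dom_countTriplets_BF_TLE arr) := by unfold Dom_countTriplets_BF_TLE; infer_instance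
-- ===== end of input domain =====

-- B counts a triplet (i,j,k) once per j via the running XOR of arr[i..k]: O(n^2) instead of A's O(n^4) slice-reducing triple loop.

-- ===== PORT A =====
-- functools.reduce(xor, l); Python raises TypeError on l = [], but A only reduces
-- nonempty slices (i < j ≤ k+1), so the [] case below is unreachable in A's uses.
def pvReduceXor (l : List Int) : Int :=
  match l with
  | [] => 0
  | h :: t => t.foldl (fun x y => PySem.Int.bxor x y) h

def countTriplets_BF_TLE (arr : List Int) : Int :=
  (PySem.List.pyRange 0 ((arr.length : Int) - 1)).foldl (fun res i =>
    (PySem.List.pyRange (i + 1) (arr.length : Int)).foldl (fun res j =>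
      (PySem.List.pyRange j (arr.length : Int)).foldl (fun res k =>
        let a := pvReduceXor (PySem.List.slice arr (some i) (some j))
        let b := pvReduceXor (PySem.List.slice arr (some j) (some (k + 1)))
        if a == b then res + 1 else res) res) res) 0

-- ===== PORT B =====
def countTriplets_BF_TLE_alt (arr : List Int) : Int :=
  (PySem.List.pyRange 0 (arr.length : Int)).foldl (fun res i =>
    ((PySem.List.pyRange i (arr.length : Int)).foldl (fun st k =>
        let cur := PySem.Int.bxor st.1 (PySem.List.pyGetD arr k 0)  -- arr[k]; k is always in range here
        (cur, if cur == 0 then st.2 + (k - i) else st.2))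
      ((0 : Int), res)).2) 0

-- ===== PRECONDITION & SPEC =====
def Spec_countTriplets_BF_TLE (arr : List Int) (out : Int) : Prop := out = countTriplets_BF_TLE_alt arr
instance (arr : List Int) (out : Int) : Decidable (Spec_countTriplets_BF_TLE arr out) := by unfold Spec_countTriplets_BF_TLE; infer_instance

-- ===== CLAIM (what is proved, stated in full; the proofs are below) =====
def Claim_equal_countTriplets_BF_TLE : Prop := ∀ (arr : List Int), Dom_countTriplets_BF_TLE arr → Spec_countTriplets_BF_TLE arr (countTriplets_BF_TLE arr)

-- ===== LEMMAS AND PROOFS =====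

-- XOR algebra on Int (Python-exact bxor)
theorem pvBxor_ofNat_negSucc (m n : Nat) :
    PySem.Int.bxor (Int.ofNat m) (Int.negSucc n) = Int.negSucc (m ^^^ n) := by
  have h1 : (0 : Int) ≤ Int.ofNat m := by simp [Int.ofNat_eq_natCast]
  have h2 : ¬ (0 : Int) ≤ Int.negSucc n := by rw [Int.negSucc_eq]; omega
  simp only [PySem.Int.bxor, h1, h2, if_true, if_false]
  have : (-(Int.negSucc n) - 1).toNat = n := by rw [Int.negSucc_eq]; omega
  rw [this]
  simp only [Int.ofNat_eq_natCast, Int.toNat_natCast, Int.negSucc_eq]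
  ring
theorem pvBxor_negSucc_ofNat (m n : Nat) :
    PySem.Int.bxor (Int.negSucc m) (Int.ofNat n) = Int.negSucc (m ^^^ n) := by
  have h1 : ¬ (0 : Int) ≤ Int.negSucc m := by rw [Int.negSucc_eq]; omega
  have h2 : (0 : Int) ≤ Int.ofNat n := by simp [Int.ofNat_eq_natCast]
  simp only [PySem.Int.bxor, h1, h2, if_true, if_false]
  have : (-(Int.negSucc m) - 1).toNat = m := by rw [Int.negSucc_eq]; omega
  rw [this]
  simp only [Int.ofNat_eq_natCast, Int.toNat_natCast, Int.negSucc_eq]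
  ring
theorem pvBxor_negSucc_negSucc (m n : Nat) :
    PySem.Int.bxor (Int.negSucc m) (Int.negSucc n) = Int.ofNat (m ^^^ n) := by
  have h1 : ¬ (0 : Int) ≤ Int.negSucc m := by rw [Int.negSucc_eq]; omega
  have h2 : ¬ (0 : Int) ≤ Int.negSucc n := by rw [Int.negSucc_eq]; omega
  simp only [PySem.Int.bxor, h1, h2, if_false]
  have e1 : (-(Int.negSucc m) - 1).toNat = m := by rw [Int.negSucc_eq]; omega
  have e2 : (-(Int.negSucc n) - 1).toNat = n := by rw [Int.negSucc_eq]; omega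
  rw [e1, e2, Int.ofNat_eq_natCast]
theorem pvBxor_assoc (a b c : Int) :
    PySem.Int.bxor (PySem.Int.bxor a b) c = PySem.Int.bxor a (PySem.Int.bxor b c) := by
  have cx : ∀ x y : Nat, PySem.Int.bxor (Int.ofNat x) (Int.ofNat y) = Int.ofNat (x ^^^ y) := by
    intro x y
    simp only [Int.ofNat_eq_natCast, PySem.Int.bxor_natCast]
  rcases a with m | m <;> rcases b with n | n <;> rcases c with p | p <;>
    simp only [cx, pvBxor_ofNat_negSucc, pvBxor_negSucc_ofNat, pvBxor_negSucc_negSucc,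
      Nat.xor_assoc]

theorem pvZero_bxor (a : Int) : PySem.Int.bxor 0 a = a := by
  rw [PySem.Int.bxor_comm]; exact PySem.Int.bxor_zero a

theorem pvBxor_eq_zero_iff (a b : Int) : PySem.Int.bxor a b = 0 ↔ a = b := by
  constructor
  · intro h
    have : PySem.Int.bxor (PySem.Int.bxor a b) b = PySem.Int.bxor 0 b := by rw [h]
    rwa [pvBxor_assoc, PySem.Int.bxor_self, PySem.Int.bxor_zero,
      PySem.Int.bxor_comm 0 b, PySem.Int.bxor_zero] at this
  · intro h; rw [h, PySem.Int.bxor_self]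
theorem pvFoldl_bxor_shift (l : List Int) (c : Int) :
    l.foldl PySem.Int.bxor c = PySem.Int.bxor c (l.foldl PySem.Int.bxor 0) := by
  induction l generalizing c with
  | nil => simp [PySem.Int.bxor_zero]
  | cons h t ih =>
    simp only [List.foldl_cons]
    rw [ih (PySem.Int.bxor c h), ih (PySem.Int.bxor 0 h), ← pvBxor_assoc,
      ← pvBxor_assoc, PySem.Int.bxor_zero]

theorem pvFoldl_bxor_append (u v : List Int) :
    (u ++ v).foldl PySem.Int.bxor 0
      = PySem.Int.bxor (u.foldl PySem.Int.bxor 0) (v.foldl PySem.Int.bxor 0) := by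
  rw [List.foldl_append, pvFoldl_bxor_shift]

theorem pvReduceXor_eq (l : List Int) : pvReduceXor l = l.foldl PySem.Int.bxor 0 := by
  cases l with
  | nil => rfl
  | cons h t => simp [pvReduceXor, List.foldl_cons, pvZero_bxor]

-- XOR of the slice arr[i:j] (proof-only helper)
def pvSX (arr : List Int) (i j : Int) : Int :=
  (PySem.List.slice arr (some i) (some j)).foldl PySem.Int.bxor 0

theorem pvSX_split (arr : List Int) (i j k : Nat) (hij : i ≤ j) (hjk : j ≤ k) :
    pvSX arr (i : Int) (k : Int) = PySem.Int.bxor (pvSX arr i j) (pvSX arr j k) := by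
  unfold pvSX
  rw [PySem.List.slice_natCast, PySem.List.slice_natCast, PySem.List.slice_natCast]
  rw [show k - i = (j - i) + (k - j) by omega, List.take_add, List.drop_drop,
    show i + (j - i) = j by omega]
  exact pvFoldl_bxor_append _ _

theorem pvSX_succ (arr : List Int) (i m : Nat) (him : i ≤ m) (hm : m < arr.length) :
    pvSX arr (i : Int) ((m : Int) + 1)
      = PySem.Int.bxor (pvSX arr i m) (PySem.List.pyGetD arr (m : Int) 0) := by
  have h1 : ((m : Int) + 1) = ((m + 1 : Nat) : Int) := by push_cast; ring
  rw [h1, pvSX_split arr i m (m+1) him (by omega)]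
  congr 1
  unfold pvSX
  rw [PySem.List.slice_natCast, show m + 1 - m = 1 by omega,
    List.drop_eq_getElem_cons hm]
  simp only [List.take_succ_cons, List.take_zero, List.foldl_cons, List.foldl_nil]
  rw [PySem.List.pyGetD_natCast, List.getD_eq_getElem?_getD, List.getElem?_eq_getElem hm,
    Option.getD_some]
  exact pvZero_bxor _

theorem pvSX_refl (arr : List Int) (i : Nat) : pvSX arr (i : Int) (i : Int) = 0 := by
  unfold pvSX
  rw [PySem.List.slice_natCast]
  simp

-- the common per-start-index value
def pvM (arr : List Int) (i : Int) : Int :=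
  ((PySem.List.pyRange i (arr.length : Int)).map
    (fun k => if pvSX arr i (k + 1) == 0 then k - i else 0)).sum

-- condition equivalence: A's slice-equality test is "running xor over arr[i..k] is 0"
theorem pvCond_eq (arr : List Int) (i j k : Int) (h0 : 0 ≤ i) (hij : i < j) (hjk : j ≤ k) :
    (pvReduceXor (PySem.List.slice arr (some i) (some j))
       == pvReduceXor (PySem.List.slice arr (some j) (some (k + 1))))
      = (pvSX arr i (k + 1) == 0) := by
  rw [pvReduceXor_eq, pvReduceXor_eq]
  show (pvSX arr i j == pvSX arr j (k+1)) = (pvSX arr i (k + 1) == 0)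
  obtain ⟨a, rfl⟩ : ∃ n : Nat, i = (n : Int) := ⟨i.toNat, (Int.toNat_of_nonneg h0).symm⟩
  obtain ⟨b, rfl⟩ : ∃ n : Nat, j = (n : Int) := ⟨j.toNat, (Int.toNat_of_nonneg (by omega)).symm⟩
  obtain ⟨c, rfl⟩ : ∃ n : Nat, k = (n : Int) := ⟨k.toNat, (Int.toNat_of_nonneg (by omega)).symm⟩
  have e : ((c : Int) + 1) = ((c + 1 : Nat) : Int) := by push_cast; ring
  rw [e, pvSX_split arr a b (c+1) (by omega) (by omega)]
  rw [Bool.eq_iff_iff]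
  simp only [beq_iff_eq]
  exact (pvBxor_eq_zero_iff _ _).symm

-- triangle sum: sum over j of tail sums equals a (k - a + 1)-weighted single sum
theorem pvL1 (c : Int → Int) (N : Int) (t : Nat) (a : Int) (ha : a + (t : Int) = N) :
    ((PySem.List.pyRange a N).map (fun j => ((PySem.List.pyRange j N).map c).sum)).sum
      = ((PySem.List.pyRange a N).map (fun k => (k - a + 1) * c k)).sum := by
  induction t generalizing a with
  | zero =>
    have : N ≤ a := by omega
    rw [PySem.List.pyRange_one_eq_nil this]
    simp
  | succ t ih =>
    have haN : a < N := by push_cast at ha; omega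
    have ih' := ih (a + 1) (by push_cast at ha ⊢; omega)
    rw [PySem.List.pyRange_one_cons haN, List.map_cons, List.sum_cons, List.map_cons,
      List.sum_cons, ih']
    show ((PySem.List.pyRange a N).map c).sum + _ = _
    rw [PySem.List.pyRange_one_cons haN, List.map_cons, List.sum_cons]
    have hcomb :
        ((PySem.List.pyRange (a+1) N).map c).sum
          + ((PySem.List.pyRange (a+1) N).map (fun k => (k - (a+1) + 1) * c k)).sum
        = ((PySem.List.pyRange (a+1) N).map (fun k => (k - a + 1) * c k)).sum := by
      rw [← PySem.List.sum_map_add_int]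
      apply congrArg
      apply List.map_congr_left
      intro k _
      ring
    have : a - a + 1 = 1 := by ring
    rw [this, one_mul]
    omega

-- B's inner loop characterised
theorem pvB_inner (arr : List Int) (i t : Nat) (h : i + t ≤ arr.length) (r0 : Int) :
    (PySem.List.pyRange (i : Int) ((i + t : Nat) : Int)).foldl (fun st k =>
        let cur := PySem.Int.bxor st.1 (PySem.List.pyGetD arr k 0)
        (cur, if cur == 0 then st.2 + (k - (i : Int)) else st.2))
      ((0 : Int), r0)
      = (pvSX arr i ((i + t : Nat) : Int),
         r0 + ((PySem.List.pyRange (i : Int) ((i + t : Nat) : Int)).map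
                 (fun k => if pvSX arr i (k + 1) == 0 then k - (i : Int) else 0)).sum) := by
  induction t with
  | zero =>
    rw [show ((i + 0 : Nat) : Int) = (i : Int) by push_cast; ring]
    rw [PySem.List.pyRange_one_eq_nil (le_refl _)]
    simp [pvSX_refl]
  | succ t ih =>
    have e : ((i + (t + 1) : Nat) : Int) = ((i + t : Nat) : Int) + 1 := by push_cast; ring
    have hle : (i : Int) ≤ ((i + t : Nat) : Int) := by push_cast; omega
    rw [e, PySem.List.pyRange_one_succ_right hle, List.foldl_append, List.map_append,
      List.sum_append, ih (by omega)]
    simp only [List.foldl_cons, List.foldl_nil, List.map_cons, List.map_nil, List.sum_cons,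
      List.sum_nil]
    have hsx : PySem.Int.bxor (pvSX arr i ((i + t : Nat) : Int))
        (PySem.List.pyGetD arr ((i + t : Nat) : Int) 0)
        = pvSX arr i (((i + t : Nat) : Int) + 1) :=
      (pvSX_succ arr i (i + t) (by omega) (by omega)).symm
    simp only [hsx]
    rw [Prod.mk.injEq]
    refine ⟨rfl, ?_⟩
    split <;> ring

theorem pvB_eq_sum (arr : List Int) :
    countTriplets_BF_TLE_alt arr
      = ((PySem.List.pyRange 0 (arr.length : Int)).map (pvM arr)).sum := by
  unfold countTriplets_BF_TLE_alt
  refine Eq.trans (PySem.List.foldl_congr_mem _ _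
    (fun res i => res + pvM arr i) _
    (by
      intro acc x hx
      rw [PySem.List.mem_pyRange_one] at hx
      obtain ⟨ni, rfl⟩ : ∃ n : Nat, x = (n : Int) := ⟨x.toNat, (Int.toNat_of_nonneg hx.1).symm⟩
      have hni : ni ≤ arr.length := by exact_mod_cast le_of_lt hx.2
      have e : (arr.length : Int) = ((ni + (arr.length - ni) : Nat) : Int) := by push_cast; omega
      show (_ : Int × Int).2 = acc + pvM arr (ni : Int)
      rw [show pvM arr (ni : Int)
            = ((PySem.List.pyRange (ni : Int) (arr.length : Int)).map
                (fun k => if pvSX arr (ni : Int) (k + 1) == 0 then k - (ni : Int) else 0)).sum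
          from rfl]
      rw [e, pvB_inner arr ni (arr.length - ni) (by omega) acc])) ?_

  rw [PySem.List.foldl_add]
  simp

theorem pvA_eq_sum (arr : List Int) :
    countTriplets_BF_TLE arr
      = ((PySem.List.pyRange 0 ((arr.length : Int) - 1)).map (pvM arr)).sum := by
  unfold countTriplets_BF_TLE
  simp only [PySem.List.foldl_if_add_one, PySem.List.foldl_add, zero_add]
  apply congrArg
  apply List.map_congr_left
  intro i hi
  rw [PySem.List.mem_pyRange_one] at hi
  simp only [← PySem.List.sum_map_ite_one_zero]
  rw [List.map_congr_left (g := fun j =>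
      ((PySem.List.pyRange j (arr.length : Int)).map
        (fun k => if pvSX arr i (k + 1) == 0 then (1 : Int) else 0)).sum)
    (by
      intro j hj
      rw [PySem.List.mem_pyRange_one] at hj
      apply congrArg
      apply List.map_congr_left
      intro k hk
      rw [PySem.List.mem_pyRange_one] at hk
      rw [pvCond_eq arr i j k hi.1 (by omega) (by omega)])]
  rw [pvL1 _ _ ((arr.length : Int) - (i + 1)).toNat (i + 1) (by omega)]
  unfold pvM
  rw [PySem.List.pyRange_one_cons (show i < (arr.length : Int) by omega),
    List.map_cons, List.sum_cons]
  rw [show (if pvSX arr i (i + 1) == 0 then i - i else 0) = 0 from by split <;> omega, zero_add]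
  apply congrArg
  apply List.map_congr_left
  intro k hk
  rw [mul_ite, mul_one, mul_zero]
  split <;> ring

theorem pvM_last (arr : List Int) (_h : 1 ≤ arr.length) :
    pvM arr ((arr.length : Int) - 1) = 0 := by
  unfold pvM
  set a := (arr.length : Int) - 1 with ha
  rw [show (arr.length : Int) = a + 1 from by rw [ha]; ring, PySem.List.pyRange_one_singleton]
  simp

-- ===== VERDICT (by name: the statement is the Claim_ definition above) =====
theorem countTriplets_BF_TLE_spec : Claim_equal_countTriplets_BF_TLE := by
  intro arr _
  show countTriplets_BF_TLE arr = countTriplets_BF_TLE_alt arr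
  rw [pvA_eq_sum, pvB_eq_sum]
  rcases Nat.eq_zero_or_pos arr.length with h | h
  · simp [h, PySem.List.pyRange_one_eq_nil]
  · have h1 : (1 : Int) ≤ (arr.length : Int) := by exact_mod_cast h
    have : PySem.List.pyRange 0 (arr.length : Int)
        = PySem.List.pyRange 0 ((arr.length : Int) - 1) ++ [(arr.length : Int) - 1] := by
      have := PySem.List.pyRange_one_succ_right (a := 0) (b := (arr.length : Int) - 1) (by omega)
      simpa using this
    rw [this, List.map_append, List.sum_append]
    simp [pvM_last arr h]
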